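-- pv_equiv track=rewrite | github.com/1droozd1/MAI_Labs | 4_course/contest/10_11/test.py | can_schedule_training
-- ===== SOURCE A (Python) =====
-- from collections import defaultdict
--
-- def can_schedule_training(n, m, tM, tK, dependencies):
--     # Строим граф зависимостей для преподавателя Медера
--     graph_M = defaultdict(list)
--     graph_K = defaultdict(list)
--
--     for fi, si in dependencies:
--         if fi != tK:
--             graph_M[fi].append(si)
--
--     for fi, si in dependencies:
--         if fi != tM:
--             graph_K[fi].append(si)
--
--     # Функция для поиска листьев в графе
--     def find_leaves(graph):
--         leaves = []
--         for node in range(1, n+1):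
--             if len(graph[node]) == 0 and node != tM and node != tK:
--                 leaves.append(node)
--         return leaves
--
--     leaves_M = find_leaves(graph_M)
--     leaves_K = find_leaves(graph_K)
--
--     # Теперь соединяем все листья двух графов между собой
--     for leaf_M in leaves_M:
--         for leaf_K in leaves_K:
--             graph_M[leaf_M].append(leaf_K)  # Соединяем листья между собой
--
--     # Функция для нахождения пути с обходом всех вершин
--     def dfs_paths(start, graph):
--         visited = set()
--         path = []
--         def dfs(node):
--             visited.add(node)
--             path.append(node)
--             for neighbor in graph[node]:
--                 if neighbor not in visited:
--                     dfs(neighbor)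
--         dfs(start)
--         return path
--
--     # Находим путь для Медера и Кылычбека
--     path_M = dfs_paths(tM, graph_M)
--     path_K = dfs_paths(tK, graph_K)
--
--     # Проверяем, что все вершины покрыты
--     all_covered = set(path_M) | set(path_K)
--     if len(all_covered) == n:
--         result = ["YES"]
--         result.append(str(len(path_M)))
--         result.append(" ".join(map(str, path_M)))
--         result.append(str(len(path_K)))
--         result.append(" ".join(map(str, path_K)))
--         return "\n".join(result)
--     else:
--         return "NO"
-- ===== SOURCE B (Python) =====
-- from collections import defaultdict
--
-- def can_schedule_training(n, m, tM, tK, dependencies):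
--     # one pass builds both adjacency dicts
--     graph_M = defaultdict(list)
--     graph_K = defaultdict(list)
--     for fi, si in dependencies:
--         if fi != tK:
--             graph_M[fi].append(si)
--         if fi != tM:
--             graph_K[fi].append(si)
--     # leaves found from the edge sources directly, no per-node adjacency probe
--     sources_M = {fi for fi, si in dependencies if fi != tK}
--     sources_K = {fi for fi, si in dependencies if fi != tM}
--     leaves_M = [v for v in range(1, n + 1) if v not in sources_M and v != tM and v != tK]
--     leaves_K = [v for v in range(1, n + 1) if v not in sources_K and v != tM and v != tK]
--     # each M-leaf gets the whole K-leaf list at once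
--     for leaf in leaves_M:
--         if leaves_K:
--             graph_M[leaf] = list(leaves_K)
--     # iterative DFS with an explicit stack (reversed pushes give recursive pre-order)
--     def walk(start, graph):
--         seen = set()
--         order = []
--         stack = [start]
--         while stack:
--             v = stack.pop()
--             if v in seen:
--                 continue
--             seen.add(v)
--             order.append(v)
--             stack.extend(reversed(graph[v]))
--         return order
--     path_M = walk(tM, graph_M)
--     path_K = walk(tK, graph_K)
--     if len(set(path_M) | set(path_K)) == n:
--         return "\n".join(["YES", str(len(path_M)), " ".join(map(str, path_M)),
--                           str(len(path_K)), " ".join(map(str, path_K))])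
--     return "NO"
-- ===== Notes on version B (the rewrite author's own statement) =====
-- stated objective: alternative
-- what changed: B builds both adjacency dicts in a single pass, derives leaves from the set of edge sources instead of probing each node's adjacency list, assigns the whole K-leaf list to each M-leaf at once instead of the nested append loop, and replaces the recursive DFS with an explicit-stack iterative DFS (reversed pushes, visited checked on pop).
import Mathlib
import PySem

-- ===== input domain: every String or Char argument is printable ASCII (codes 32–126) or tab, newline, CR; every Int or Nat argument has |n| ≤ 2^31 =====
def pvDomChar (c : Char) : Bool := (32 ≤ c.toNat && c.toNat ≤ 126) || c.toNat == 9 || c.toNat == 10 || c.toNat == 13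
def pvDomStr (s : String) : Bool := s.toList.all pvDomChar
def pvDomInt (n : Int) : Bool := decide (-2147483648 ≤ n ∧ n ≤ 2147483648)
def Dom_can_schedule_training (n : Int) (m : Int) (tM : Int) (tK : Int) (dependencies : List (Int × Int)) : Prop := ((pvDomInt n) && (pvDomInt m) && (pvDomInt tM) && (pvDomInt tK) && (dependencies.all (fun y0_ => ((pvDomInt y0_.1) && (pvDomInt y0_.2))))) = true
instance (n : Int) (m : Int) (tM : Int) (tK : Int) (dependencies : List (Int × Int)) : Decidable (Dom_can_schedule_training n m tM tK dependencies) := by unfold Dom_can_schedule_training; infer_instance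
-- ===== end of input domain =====

-- B restructures A: one build pass for both graphs, leaves from the edge-source set instead of
-- per-node adjacency probes, whole-list leaf connection, and an explicit-stack iterative DFS in
-- place of A's recursive DFS (objective: alternative decomposition, same asymptotic cost).

-- ===== PORT A =====
-- shared with port B: one conditional defaultdict append 'if fi != t: graph[fi].append(si)'
def pvAppendDep (t : Int) (d : PySem.Dict Int (List Int)) (p : Int × Int) : PySem.Dict Int (List Int) :=
  if p.1 ≠ t then d.modify p.1 [] (fun v => v ++ [p.2]) else d

-- A's find_leaves: scan range(1, n+1) probing graph[node]
def pvFindLeaves (n tM tK : Int) (g : PySem.Dict Int (List Int)) : List Int :=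
  (PySem.List.pyRange 1 (n + 1) 1).foldl
    (fun leaves node =>
      if (g.getD node []).length == 0 && node != tM && node != tK then leaves ++ [node] else leaves)
    []

-- fuel guard for the DFS recursions (never reached: both DFSs visit each node at most once,
-- and every visited node is the start or some adjacency value)
def pvFuel (g : PySem.Dict Int (List Int)) (start : Int) : Nat :=
  (PySem.Set.ofList (start :: (PySem.Dict.values g).flatten)).length + 1

-- A's recursive dfs: add node, append to path, recurse on unvisited neighbours in order
def pvDfsA (adj : Int → List Int) : Nat → Int → PySem.Set Int × List Int → PySem.Set Int × List Int
  | 0, _, st => st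
  | fuel + 1, node, st =>
      (adj node).foldl
        (fun s nb => if PySem.Set.contains s.1 nb then s else pvDfsA adj fuel nb s)
        (PySem.Set.add st.1 node, st.2 ++ [node])

def pvDfsPathsA (g : PySem.Dict Int (List Int)) (start : Int) : List Int :=
  (pvDfsA (fun x => g.getD x []) (pvFuel g start) start (PySem.Set.empty, [])).2

-- shared with port B: the final coverage check and formatting (identical in both Pythons)
def pvRender (n : Int) (pM pK : List Int) : String :=
  if PySem.Set.len (PySem.Set.union (PySem.Set.ofList pM) (PySem.Set.ofList pK)) = n then
    PySem.Str.join "\n"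
      ["YES", PySem.Int.toStr (pM.length : Int), PySem.Str.join " " (pM.map PySem.Int.toStr),
       PySem.Int.toStr (pK.length : Int), PySem.Str.join " " (pK.map PySem.Int.toStr)]
  else "NO"

def can_schedule_training (n : Int) (m : Int) (tM : Int) (tK : Int) (dependencies : List (Int × Int)) : String :=
  let graph_M := dependencies.foldl (pvAppendDep tK) PySem.Dict.empty
  let graph_K := dependencies.foldl (pvAppendDep tM) PySem.Dict.empty
  let leaves_M := pvFindLeaves n tM tK graph_M
  let leaves_K := pvFindLeaves n tM tK graph_K
  let graph_M2 := leaves_M.foldl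
    (fun g lM => leaves_K.foldl (fun g lk => g.modify lM [] (fun v => v ++ [lk])) g) graph_M
  let path_M := pvDfsPathsA graph_M2 tM
  let path_K := pvDfsPathsA graph_K tK
  pvRender n path_M path_K

-- ===== PORT B =====
-- B's source set: {fi for fi, si in dependencies if fi != t}
def pvSources (t : Int) (deps : List (Int × Int)) : PySem.Set Int :=
  PySem.Set.ofList ((deps.filter (fun p => p.1 ≠ t)).map (fun p => p.1))

-- B's leaves: list comprehension over range(1, n+1) testing set membership
def pvLeavesB (n tM tK : Int) (src : PySem.Set Int) : List Int :=
  (PySem.List.pyRange 1 (n + 1) 1).filter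
    (fun v => !PySem.Set.contains src v && v != tM && v != tK)

-- B's iterative DFS; the stack is modelled head-first (head = Python's stack[-1]), so
-- 'stack.extend(reversed(graph[v]))' is 'adj v ++ stk'
def pvDfsB (adj : Int → List Int) : Nat → List Int → PySem.Set Int × List Int → PySem.Set Int × List Int
  | _, [], st => st
  | fuel, v :: stk, st =>
      if PySem.Set.contains st.1 v then pvDfsB adj fuel stk st
      else
        match fuel with
        | 0 => st
        | fuel' + 1 => pvDfsB adj fuel' (adj v ++ stk) (PySem.Set.add st.1 v, st.2 ++ [v])
  termination_by fuel stk _ => (fuel, stk.length)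

def pvWalkB (g : PySem.Dict Int (List Int)) (start : Int) : List Int :=
  (pvDfsB (fun x => g.getD x []) (pvFuel g start) [start] (PySem.Set.empty, [])).2

def can_schedule_training_alt (n : Int) (m : Int) (tM : Int) (tK : Int) (dependencies : List (Int × Int)) : String :=
  let gs := dependencies.foldl
    (fun (gg : PySem.Dict Int (List Int) × PySem.Dict Int (List Int)) p =>
      (pvAppendDep tK gg.1 p, pvAppendDep tM gg.2 p))
    (PySem.Dict.empty, PySem.Dict.empty)
  let leaves_M := pvLeavesB n tM tK (pvSources tK dependencies)
  let leaves_K := pvLeavesB n tM tK (pvSources tM dependencies)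
  let graph_M2 := leaves_M.foldl
    (fun g leaf => if leaves_K.isEmpty then g else g.insert leaf leaves_K) gs.1
  let path_M := pvWalkB graph_M2 tM
  let path_K := pvWalkB gs.2 tK
  pvRender n path_M path_K

-- ===== PRECONDITION & SPEC =====
def Spec_can_schedule_training (n : Int) (m : Int) (tM : Int) (tK : Int) (dependencies : List (Int × Int)) (out : String) : Prop := out = can_schedule_training_alt n m tM tK dependencies
instance (n : Int) (m : Int) (tM : Int) (tK : Int) (dependencies : List (Int × Int)) (out : String) : Decidable (Spec_can_schedule_training n m tM tK dependencies out) := by unfold Spec_can_schedule_training; infer_instance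

-- ===== CLAIM (what is proved, stated in full; the proofs are below) =====
def Claim_equal_can_schedule_training : Prop := ∀ (n : Int) (m : Int) (tM : Int) (tK : Int) (dependencies : List (Int × Int)), Dom_can_schedule_training n m tM tK dependencies → Spec_can_schedule_training n m tM tK dependencies (can_schedule_training n m tM tK dependencies)

-- ===== LEMMAS AND PROOFS =====

-- ---- graph building ----

lemma pv_build_eq_filter (t : Int) (deps : List (Int × Int)) (d : PySem.Dict Int (List Int)) :
    deps.foldl (pvAppendDep t) d
      = (deps.filter (fun p => p.1 ≠ t)).foldl
          (fun d p => d.modify p.1 [] (fun v => v ++ [p.2])) d := by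
  induction deps generalizing d with
  | nil => rfl
  | cons p rest ih =>
    by_cases h : p.1 = t
    · simp [pvAppendDep, h, ih]
    · simp [pvAppendDep, h, ih]

lemma pv_getD_build (t : Int) (deps : List (Int × Int)) (c : Int) :
    (deps.foldl (pvAppendDep t) PySem.Dict.empty).getD c []
      = (((deps.filter (fun p => p.1 ≠ t)).filter (fun p => p.1 == c)).map (fun p => p.2)) := by
  rw [pv_build_eq_filter, PySem.Dict.getD_foldl_modify_append]
  simp [PySem.Dict.getD_empty]

lemma pv_getD_build_nil_iff (t : Int) (deps : List (Int × Int)) (c : Int) :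
    (deps.foldl (pvAppendDep t) PySem.Dict.empty).getD c [] = []
      ↔ ¬ c ∈ (deps.filter (fun p => p.1 ≠ t)).map (fun p => p.1) := by
  rw [pv_getD_build, List.map_eq_nil_iff, List.filter_eq_nil_iff]
  simp only [List.mem_map, beq_iff_eq]
  constructor
  · rintro h ⟨p, hp, hc⟩
    exact h p hp (by simp [hc])
  · intro h p hp hc
    exact h ⟨p, hp, by simpa using hc⟩

-- ---- leaves ----

lemma pv_findLeaves_eq_filter (n tM tK : Int) (g : PySem.Dict Int (List Int)) :
    pvFindLeaves n tM tK g
      = (PySem.List.pyRange 1 (n + 1) 1).filter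
          (fun node => (g.getD node []).length == 0 && node != tM && node != tK) := by
  unfold pvFindLeaves
  simpa using PySem.List.foldl_append_if
    (fun node => (g.getD node []).length == 0 && node != tM && node != tK)
    (fun x => x) (PySem.List.pyRange 1 (n + 1) 1) []

lemma pv_leaves_eq (n tM tK t : Int) (deps : List (Int × Int)) :
    pvFindLeaves n tM tK (deps.foldl (pvAppendDep t) PySem.Dict.empty)
      = pvLeavesB n tM tK (pvSources t deps) := by
  rw [pv_findLeaves_eq_filter]
  unfold pvLeavesB
  apply List.filter_congr
  intro v _
  have hsrc : PySem.Set.contains (pvSources t deps) v = true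
      ↔ v ∈ (deps.filter (fun p => p.1 ≠ t)).map (fun p => p.1) := by
    unfold pvSources
    simp [PySem.Set.contains, PySem.Set.mem_ofList]
  have hlen : (((deps.foldl (pvAppendDep t) PySem.Dict.empty).getD v []).length == 0)
      = !PySem.Set.contains (pvSources t deps) v := by
    cases h : PySem.Set.contains (pvSources t deps) v with
    | false =>
      have hnm : ¬ v ∈ (deps.filter (fun p => p.1 ≠ t)).map (fun p => p.1) := by
        intro hm
        exact absurd (hsrc.mpr hm) (by rw [h]; simp)
      simp [(pv_getD_build_nil_iff t deps v).mpr hnm]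
    | true =>
      have hm := hsrc.mp h
      have hne : ¬ (deps.foldl (pvAppendDep t) PySem.Dict.empty).getD v [] = [] := by
        intro hnil
        exact (pv_getD_build_nil_iff t deps v).mp hnil hm
      simp [List.length_eq_zero_iff, hne]
  rw [hlen]

lemma pv_leaves_nodup (n tM tK : Int) (g : PySem.Dict Int (List Int)) :
    (pvFindLeaves n tM tK g).Nodup := by
  rw [pv_findLeaves_eq_filter]
  exact (PySem.List.nodup_pyRange_one 1 (n + 1)).filter _

lemma pv_leaves_getD_nil (n tM tK : Int) (g : PySem.Dict Int (List Int)) (l : Int)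
    (h : l ∈ pvFindLeaves n tM tK g) : g.getD l [] = [] := by
  rw [pv_findLeaves_eq_filter] at h
  have := List.of_mem_filter h
  simp only [Bool.and_eq_true, beq_iff_eq] at this
  exact List.length_eq_zero_iff.mp this.1.1

-- ---- leaf connection ----

lemma pv_inner_fold (ks : List Int) (hks : ks ≠ []) (x : Int) (g : PySem.Dict Int (List Int)) :
    ks.foldl (fun g k => g.modify x [] (fun v => v ++ [k])) g
      = g.insert x (g.getD x [] ++ ks) := by
  induction ks generalizing g with
  | nil => exact absurd rfl hks
  | cons k rest ih =>
    rcases rest with _ | ⟨k2, rest⟩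
    · simp [PySem.Dict.modify]
    · have := ih (by simp) (g.modify x [] (fun v => v ++ [k]))
      simp only [List.foldl_cons] at *
      rw [this]
      simp [PySem.Dict.modify, PySem.Dict.getD_insert_self, PySem.Dict.insert_insert_self]

lemma pv_connect_eq (lM lK : List Int) (g : PySem.Dict Int (List Int))
    (hnd : lM.Nodup) (hleaf : ∀ l ∈ lM, g.getD l [] = []) :
    lM.foldl (fun g a => lK.foldl (fun g k => g.modify a [] (fun v => v ++ [k])) g) g
      = lM.foldl (fun g leaf => if lK.isEmpty then g else g.insert leaf lK) g := by
  induction lM generalizing g with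
  | nil => rfl
  | cons a rest ih =>
    simp only [List.foldl_cons]
    by_cases hk : lK = []
    · subst hk
      simp only [List.foldl_nil, List.isEmpty_nil, if_true]
    · have hke : lK.isEmpty = false := by
        cases lK with
        | nil => exact absurd rfl hk
        | cons _ _ => rfl
      rw [pv_inner_fold lK hk a g, hleaf a List.mem_cons_self, if_neg (by simp [hke]),
        List.nil_append]
      apply ih
      · exact hnd.of_cons
      · intro l hl
        rw [PySem.Dict.getD_insert_of_ne _ _ _ (by
          intro hla
          exact (List.nodup_cons.mp hnd).1 (hla ▸ hl))]
        exact hleaf l (List.mem_cons_of_mem _ hl)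

-- ---- DFS: recursive (A) vs explicit stack (B) ----

def pvChk (adj : Int → List Int) (f : Nat) (x : Int)
    (st : PySem.Set Int × List Int) : PySem.Set Int × List Int :=
  if PySem.Set.contains st.1 x then st else pvDfsA adj f x st

lemma pv_dfsA_succ (adj : Int → List Int) (f : Nat) (node : Int) (st : PySem.Set Int × List Int) :
    pvDfsA adj (f + 1) node st
      = (adj node).foldl (fun s nb => pvChk adj f nb s) (PySem.Set.add st.1 node, st.2 ++ [node]) := rfl

lemma pv_contains_iff {s : PySem.Set Int} {x : Int} :
    PySem.Set.contains s x = true ↔ x ∈ s := by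
  simp [PySem.Set.contains]

lemma pv_mem_add {s : PySem.Set Int} {x y : Int} (h : y ∈ s) : y ∈ PySem.Set.add s x := by
  exact (PySem.Set.mem_add s x y).mpr (Or.inl h)

lemma pv_dfsB_nil (adj : Int → List Int) (f : Nat) (st : PySem.Set Int × List Int) :
    pvDfsB adj f [] st = st := by
  rw [pvDfsB]

lemma pv_dfsB_skip (adj : Int → List Int) (f : Nat) (v : Int) (stk : List Int)
    (st : PySem.Set Int × List Int) (h : PySem.Set.contains st.1 v = true) :
    pvDfsB adj f (v :: stk) st = pvDfsB adj f stk st := by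
  rw [pvDfsB.eq_def]
  simp [pv_contains_iff.mp h]

lemma pv_dfsB_visit (adj : Int → List Int) (f : Nat) (v : Int) (stk : List Int)
    (st : PySem.Set Int × List Int) (h : PySem.Set.contains st.1 v = false) :
    pvDfsB adj (f + 1) (v :: stk) st
      = pvDfsB adj f (adj v ++ stk) (PySem.Set.add st.1 v, st.2 ++ [v]) := by
  have h' : v ∉ st.1 := fun hm => by rw [pv_contains_iff.mpr hm] at h; exact absurd h (by decide)
  rw [pvDfsB.eq_def]
  simp [h']

lemma pv_dfsA_mono (adj : Int → List Int) :
    ∀ (f : Nat) (x : Int) (st : PySem.Set Int × List Int), st.1 ⊆ (pvDfsA adj f x st).1 := by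
  intro f
  induction f with
  | zero => intro x st; exact fun _ h => h
  | succ f ih =>
    intro x st
    rw [pv_dfsA_succ]
    have hchk : ∀ (x' : Int) (s : PySem.Set Int × List Int), s.1 ⊆ (pvChk adj f x' s).1 := by
      intro x' s
      unfold pvChk
      split
      · exact fun _ h => h
      · exact ih x' s
    have haux : ∀ (l : List Int) (s : PySem.Set Int × List Int),
        s.1 ⊆ (List.foldl (fun s nb => pvChk adj f nb s) s l).1 := by
      intro l
      induction l with
      | nil => exact fun s _ h => h
      | cons z rest ihl => exact fun s y hy => ihl (pvChk adj f z s) (hchk z s hy)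
    exact fun y hy => haux (adj x) _ (pv_mem_add hy)

lemma pv_chk_mono (adj : Int → List Int) (f : Nat) (x : Int) (st : PySem.Set Int × List Int) :
    st.1 ⊆ (pvChk adj f x st).1 := by
  unfold pvChk
  split
  · exact fun _ h => h
  · exact pv_dfsA_mono adj f x st

lemma pv_foldl_chk_mono (adj : Int → List Int) (f : Nat) :
    ∀ (l : List Int) (st : PySem.Set Int × List Int),
      st.1 ⊆ ((l.foldl (fun s x => pvChk adj f x s) st)).1 := by
  intro l
  induction l with
  | nil => exact fun st => fun _ h => h
  | cons x rest ih =>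
    intro st
    exact fun y hy => ih (pvChk adj f x st) (pv_chk_mono adj f x st hy)

def pvMu (U : Finset Int) (v : List Int) : Nat := (U \ v.toFinset).card

lemma pv_mu_le (U : Finset Int) {v v' : List Int} (h : v ⊆ v') : pvMu U v' ≤ pvMu U v := by
  apply Finset.card_le_card
  apply Finset.sdiff_subset_sdiff (le_refl U)
  intro x hx
  exact List.mem_toFinset.mpr (h (List.mem_toFinset.mp hx))

lemma pv_mu_lt (U : Finset Int) {v v' : List Int} {x : Int}
    (hxU : x ∈ U) (hxv : x ∉ v) (hsub : v ⊆ v') (hxv' : x ∈ v') : pvMu U v' < pvMu U v := by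
  apply Finset.card_lt_card
  constructor
  · apply Finset.sdiff_subset_sdiff (le_refl U)
    intro y hy
    exact List.mem_toFinset.mpr (hsub (List.mem_toFinset.mp hy))
  · intro hcon
    have h1 : x ∈ U \ v.toFinset := Finset.mem_sdiff.mpr ⟨hxU, fun hc => hxv (List.mem_toFinset.mp hc)⟩
    have h2 := hcon h1
    exact (Finset.mem_sdiff.mp h2).2 (List.mem_toFinset.mpr hxv')

lemma pv_dfsB_stab (adj : Int → List Int) (U : Finset Int)
    (Hcl : ∀ x, ∀ y ∈ adj x, y ∈ U) :
    ∀ (k f f' : Nat) (stk : List Int) (st : PySem.Set Int × List Int),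
      pvMu U st.1 ≤ k → (∀ x ∈ stk, x ∈ U) → k < f → k < f' →
      pvDfsB adj f stk st = pvDfsB adj f' stk st := by
  intro k
  induction k using Nat.strong_induction_on with
  | _ k IH =>
    intro f f' stk
    induction stk with
    | nil => intro st _ _ _ _; rw [pv_dfsB_nil, pv_dfsB_nil]
    | cons v rest ihs =>
      intro st hmu hstk hf hf'
      by_cases hc : PySem.Set.contains st.1 v = true
      · rw [pv_dfsB_skip adj f v rest st hc, pv_dfsB_skip adj f' v rest st hc]
        exact ihs st hmu (fun z h => hstk z (List.mem_cons_of_mem _ h)) hf hf'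
      · obtain ⟨a, rfl⟩ : ∃ a, f = a + 1 := ⟨f - 1, by omega⟩
        obtain ⟨b, rfl⟩ : ∃ b, f' = b + 1 := ⟨f' - 1, by omega⟩
        rw [pv_dfsB_visit adj a v rest st (by cases h : PySem.Set.contains st.1 v with
          | false => rfl
          | true => exact absurd h hc),
          pv_dfsB_visit adj b v rest st (by cases h : PySem.Set.contains st.1 v with
          | false => rfl
          | true => exact absurd h hc)]
        have hxv : v ∉ st.1 := fun h => hc (pv_contains_iff.mpr h)
        have hvU : v ∈ U := hstk v List.mem_cons_self
        have hm0 : pvMu U (PySem.Set.add st.1 v) < k :=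
          lt_of_lt_of_le
            (pv_mu_lt U hvU hxv (fun y hy => pv_mem_add hy)
              ((PySem.Set.mem_add st.1 v v).mpr (Or.inr rfl))) hmu
        apply IH (pvMu U (PySem.Set.add st.1 v)) hm0 a b (adj v ++ rest) _ le_rfl
        · intro z hz
          rcases List.mem_append.mp hz with h | h
          · exact Hcl v z h
          · exact hstk z (List.mem_cons_of_mem _ h)
        · omega
        · omega

lemma pv_dfsB_bridge (adj : Int → List Int) (U : Finset Int)
    (Hcl : ∀ x, ∀ y ∈ adj x, y ∈ U) :
    ∀ (k : Nat) (xs stk : List Int) (st : PySem.Set Int × List Int) (fB fB' fA : Nat),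
      pvMu U st.1 ≤ k → (∀ x ∈ xs, x ∈ U) → (∀ x ∈ stk, x ∈ U) →
      k < fB → k < fB' → k < fA →
      pvDfsB adj fB (xs ++ stk) st
        = pvDfsB adj fB' stk (xs.foldl (fun s x => pvChk adj fA x s) st) := by
  intro k
  induction k using Nat.strong_induction_on with
  | _ k IH =>
    intro xs
    induction xs with
    | nil =>
      intro stk st fB fB' fA hmu _ hstk hfB hfB' _
      simp only [List.nil_append, List.foldl_nil]
      exact pv_dfsB_stab adj U Hcl k fB fB' stk st hmu hstk hfB hfB'
    | cons x rest ihx =>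
      intro stk st fB fB' fA hmu hxs hstk hfB hfB' hfA
      simp only [List.cons_append, List.foldl_cons]
      by_cases hc : PySem.Set.contains st.1 x = true
      · rw [pv_dfsB_skip adj fB x (rest ++ stk) st hc]
        have hchk : pvChk adj fA x st = st := by unfold pvChk; rw [if_pos hc]
        rw [hchk]
        exact ihx stk st fB fB' fA hmu (fun z h => hxs z (List.mem_cons_of_mem _ h))
          hstk hfB hfB' hfA
      · obtain ⟨a, rfl⟩ : ∃ a, fB = a + 1 := ⟨fB - 1, by omega⟩
        obtain ⟨c, rfl⟩ : ∃ c, fA = c + 1 := ⟨fA - 1, by omega⟩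
        have hcf : PySem.Set.contains st.1 x = false := by
          cases h : PySem.Set.contains st.1 x with
          | false => rfl
          | true => exact absurd h hc
        rw [pv_dfsB_visit adj a x (rest ++ stk) st hcf]
        have hxU : x ∈ U := hxs x List.mem_cons_self
        have hxv : x ∉ st.1 := fun h => hc (pv_contains_iff.mpr h)
        have hm0 : pvMu U (PySem.Set.add st.1 x) < k :=
          lt_of_lt_of_le
            (pv_mu_lt U hxU hxv (fun y hy => pv_mem_add hy)
              ((PySem.Set.mem_add st.1 x x).mpr (Or.inr rfl))) hmu
        have hrest : ∀ z ∈ rest ++ stk, z ∈ U := by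
          intro z hz
          rcases List.mem_append.mp hz with h | h
          · exact hxs z (List.mem_cons_of_mem _ h)
          · exact hstk z h
        have h1 := IH (pvMu U (PySem.Set.add st.1 x)) hm0 (adj x) (rest ++ stk)
          (PySem.Set.add st.1 x, st.2 ++ [x]) a a c le_rfl (Hcl x) hrest
          (by omega) (by omega) (by omega)
        have hm1 : pvMu U ((adj x).foldl (fun s z => pvChk adj c z s)
            (PySem.Set.add st.1 x, st.2 ++ [x])).1 < k :=
          lt_of_le_of_lt
            (pv_mu_le U (pv_foldl_chk_mono adj c (adj x) (PySem.Set.add st.1 x, st.2 ++ [x])))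
            hm0
        have h2 := IH _ hm1 rest stk
          ((adj x).foldl (fun s z => pvChk adj c z s) (PySem.Set.add st.1 x, st.2 ++ [x]))
          a fB' (c + 1) le_rfl (fun z h => hxs z (List.mem_cons_of_mem _ h)) hstk
          (by omega) (by omega) (by omega)
        have hchk : pvChk adj (c + 1) x st
            = (adj x).foldl (fun s z => pvChk adj c z s) (PySem.Set.add st.1 x, st.2 ++ [x]) := by
          unfold pvChk
          rw [if_neg hc, pv_dfsA_succ]
          rfl
        rw [hchk, h1, h2]

lemma pv_mem_flatten_of_getD (g : PySem.Dict Int (List Int)) (x y : Int)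
    (hy : y ∈ g.getD x []) : y ∈ (PySem.Dict.values g).flatten := by
  rw [PySem.Dict.getD_eq_get?_getD] at hy
  cases h : g.get? x with
  | none => rw [h] at hy; simp at hy
  | some v =>
    rw [h] at hy
    have hi := PySem.Dict.mem_items_of_get?_eq_some g h
    refine List.mem_flatten.mpr ⟨v, ?_, hy⟩
    simp only [PySem.Dict.values]
    exact List.mem_map.mpr ⟨(x, v), hi, rfl⟩

lemma pv_card_ofList (l : List Int) : l.toFinset.card = (PySem.Set.ofList l).length := by
  have h1 : (PySem.Set.ofList l).toFinset = l.toFinset := by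
    apply Finset.ext
    intro x
    simp [PySem.Set.mem_ofList]
  rw [← h1]
  exact List.toFinset_card_of_nodup (PySem.Set.nodup_ofList l)

lemma pv_dfs_eq (adj : Int → List Int) (U : Finset Int)
    (Hcl : ∀ x, ∀ y ∈ adj x, y ∈ U) (start : Int) (hstart : start ∈ U)
    (F : Nat) (hF : U.card < F) :
    pvDfsB adj F [start] (PySem.Set.empty, []) = pvDfsA adj F start (PySem.Set.empty, []) := by
  have hmu : pvMu U (PySem.Set.empty : PySem.Set Int) ≤ U.card := by
    simp [pvMu, PySem.Set.empty]
  have h := pv_dfsB_bridge adj U Hcl U.card [start] [] (PySem.Set.empty, []) F F F hmu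
    (by intro z hz; rw [List.mem_singleton] at hz; exact hz ▸ hstart)
    (by intro z hz; simp at hz) hF hF hF
  simp only [List.foldl_cons, List.foldl_nil] at h
  rw [List.append_nil, pv_dfsB_nil] at h
  rw [h]
  unfold pvChk
  rw [if_neg (by simp [PySem.Set.contains, PySem.Set.empty])]

lemma pv_walk_eq (g : PySem.Dict Int (List Int)) (start : Int) :
    pvDfsPathsA g start = pvWalkB g start := by
  unfold pvDfsPathsA pvWalkB
  rw [pv_dfs_eq (fun x => g.getD x []) (start :: (PySem.Dict.values g).flatten).toFinset
    (by
      intro x y hy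
      exact List.mem_toFinset.mpr (List.mem_cons_of_mem _ (pv_mem_flatten_of_getD g x y hy)))
    start (List.mem_toFinset.mpr List.mem_cons_self)
    (pvFuel g start)
    (by rw [pv_card_ofList]; exact Nat.lt_succ_self _)]

-- ---- assembly ----

theorem can_schedule_training_eq (n m tM tK : Int) (dependencies : List (Int × Int)) :
    can_schedule_training n m tM tK dependencies
      = can_schedule_training_alt n m tM tK dependencies := by
  unfold can_schedule_training can_schedule_training_alt
  simp only [PySem.List.foldl_prod_mk]
  rw [pv_connect_eq _ _ _ (pv_leaves_nodup n tM tK _)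
    (fun l hl => pv_leaves_getD_nil n tM tK _ l hl)]
  rw [pv_leaves_eq n tM tK tK dependencies, pv_leaves_eq n tM tK tM dependencies]
  rw [pv_walk_eq, pv_walk_eq]

-- ===== VERDICT (by name: the statement is the Claim_ definition above) =====
theorem can_schedule_training_spec : Claim_equal_can_schedule_training := by
  intro n m tM tK dependencies _
  unfold Spec_can_schedule_training
  exact can_schedule_training_eq n m tM tK dependencies
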